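-- pv_equiv track=rewrite | github.com/Argentusz/laba-inf-01 | ten_to_eight.py | ten_to_eight
-- ===== SOURCE A (Python) =====
-- def ten_to_eight(n)->str:
--     n = str(n)
--     n = int(n[::-1])
--     s =str(oct(n))
--     ar = list(map(str, list(s)))
--     del ar[0]
--     del ar[0]
--     s=''
--     for i in ar:
--        s+=i
--     return s
-- ===== SOURCE B (Python) =====
-- def ten_to_eight(n) -> str:
--     m = int(str(n)[::-1])
--     if m == 0:
--         return '0'
--     s = ''
--     while m > 0:
--         s = str(m % 8) + s
--         m //= 8
--     return s
-- ===== Notes on version B (the rewrite author's own statement) =====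
-- stated objective: simpler
-- what changed: B keeps the digit reversal int(str(n)[::-1]) but replaces oct()'s prefixed string, the char-by-char list with two dels and the += concatenation loop by a direct base-8 conversion loop (prepend str(m % 8), m //= 8, with '0' for m == 0).
import Mathlib
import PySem

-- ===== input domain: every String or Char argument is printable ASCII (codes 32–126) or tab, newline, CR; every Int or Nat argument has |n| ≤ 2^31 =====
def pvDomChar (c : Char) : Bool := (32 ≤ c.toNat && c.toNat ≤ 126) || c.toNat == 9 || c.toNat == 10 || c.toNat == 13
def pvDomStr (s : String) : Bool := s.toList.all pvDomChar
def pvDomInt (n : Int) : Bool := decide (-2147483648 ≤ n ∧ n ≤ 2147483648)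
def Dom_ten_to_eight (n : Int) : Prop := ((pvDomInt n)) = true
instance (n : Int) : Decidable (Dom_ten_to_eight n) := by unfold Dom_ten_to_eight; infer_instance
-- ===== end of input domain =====

-- B keeps A's digit reversal but replaces oct()'s string + char-list juggling (map str, two dels, concat loop)
-- by a direct %8-and-//8 digit loop (objective: simpler; same cost).

-- ===== PORT A =====
-- hand port of Python's built-in oct(): optional '-', then "0o", then base-8 digits (Nat.toDigits 8 is exactly those)
def pyOct (m : Int) : String :=
  if m < 0 then String.ofList ('-' :: '0' :: 'o' :: Nat.toDigits 8 m.natAbs)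
  else String.ofList ('0' :: 'o' :: Nat.toDigits 8 m.toNat)

def ten_to_eight (n : Int) : String :=
  -- n = str(n); n = int(n[::-1])
  match PySem.Str.slice? (PySem.Int.toStr n) none none (-1) with
  | none => ""          -- unreachable (step -1 ≠ 0)
  | some rev =>
    match PySem.Int.ofStr? rev with
    | none => ""        -- ValueError: excluded by Pre_
    | some m =>
      let s := pyOct m                                        -- s = str(oct(n)) (str of a str is itself)
      let ar := s.toList.map (fun c => String.singleton c)    -- ar = list(map(str, list(s)))
      let ar := ar.drop 1                                     -- del ar[0]
      let ar := ar.drop 1                                     -- del ar[0]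
      ar.foldl (fun acc i => acc ++ i) ""                     -- s = ''; for i in ar: s += i

-- ===== PORT B =====
-- while m > 0: s = str(m % 8) + s; m //= 8
def octLoop (m : Int) (s : String) : String :=
  if 0 < m then
    octLoop (PySem.Int.floordiv m 8) (PySem.Int.toStr (PySem.Int.mod m 8) ++ s)
  else s
termination_by m.toNat
decreasing_by
  rename_i _h
  have _h1 : 8 * (m / 8) + m % 8 = m := Int.mul_ediv_add_emod m 8
  have _h2 : 0 ≤ m % 8 := Int.emod_nonneg m (by norm_num)
  have _h3 : m % 8 < 8 := Int.emod_lt_of_pos m (by norm_num)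
  rw [PySem.Int.floordiv_eq_ediv_of_pos (by norm_num : (0:Int) < 8)]
  omega

def ten_to_eight_alt (n : Int) : String :=
  -- m = int(str(n)[::-1])
  match PySem.Str.slice? (PySem.Int.toStr n) none none (-1) with
  | none => ""          -- unreachable (step -1 ≠ 0)
  | some rev =>
    match PySem.Int.ofStr? rev with
    | none => ""        -- ValueError: excluded by Pre_
    | some m =>
      if m = 0 then "0" else octLoop m ""

-- ===== PRECONDITION & SPEC =====
-- Pre_ excludes n < 0: there str(n)[::-1] ends in '-', so int() raises ValueError in A (and equally in B).
def Pre_ten_to_eight (n : Int) : Prop := 0 ≤ n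
instance (n : Int) : Decidable (Pre_ten_to_eight n) := by unfold Pre_ten_to_eight; infer_instance
def pvWitness_ten_to_eight : Int := (203)

def Spec_ten_to_eight (n : Int) (out : String) : Prop := out = ten_to_eight_alt n
instance (n : Int) (out : String) : Decidable (Spec_ten_to_eight n out) := by unfold Spec_ten_to_eight; infer_instance

-- ===== CLAIM (what is proved, stated in full; the proofs are below) =====
def Claim_equal_ten_to_eight : Prop := ∀ (n : Int), Dom_ten_to_eight n → Pre_ten_to_eight n → Spec_ten_to_eight n (ten_to_eight n)

-- ===== LEMMAS AND PROOFS =====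

-- concatenating the singleton strings of cs onto acc yields acc ++ ofList cs
theorem foldl_append_singletons (cs : List Char) (acc : String) :
    (cs.map (fun c => String.singleton c)).foldl (fun a i => a ++ i) acc = acc ++ String.ofList cs := by
  induction cs generalizing acc with
  | nil => simp
  | cons c t ih =>
    simp only [List.map_cons, List.foldl_cons, ih]
    rw [String.singleton_eq_ofList, show (c :: t) = [c] ++ t from rfl, String.ofList_append,
        ← String.append_assoc]

-- str(k) for a single digit 0 ≤ k < 10
theorem toStr_digit (k : Int) (h0 : 0 ≤ k) (h1 : k < 10) :
    PySem.Int.toStr k = String.ofList [Nat.digitChar k.toNat] := by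
  have h : (PySem.Int.toStr k).toList = [Nat.digitChar k.toNat] := by
    rw [PySem.Int.toList_toStr]
    unfold PySem.Int.toChars
    rw [if_neg (by omega)]
    exact Nat.toDigits_of_lt_base (by omega)
  rw [← String.ofList_toList (s := PySem.Int.toStr k), h]

-- B's loop builds exactly the base-8 digit string of m (fuel k bounds m.toNat for the induction)
theorem octLoop_eq_aux (k : Nat) : ∀ (m : Int), m.toNat ≤ k → 0 < m →
    ∀ s : String, octLoop m s = String.ofList (Nat.toDigits 8 m.toNat) ++ s := by
  induction k with
  | zero => intro m hk hm; omega
  | succ k ih =>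
    intro m hk hm s
    rw [octLoop, if_pos hm]
    have h1 : 8 * (m / 8) + m % 8 = m := Int.mul_ediv_add_emod m 8
    have h2 : 0 ≤ m % 8 := Int.emod_nonneg m (by norm_num)
    have h3 : m % 8 < 8 := Int.emod_lt_of_pos m (by norm_num)
    rw [PySem.Int.floordiv_eq_ediv_of_pos (by norm_num : (0:Int) < 8),
        PySem.Int.mod_eq_emod_of_pos (by norm_num : (0:Int) < 8)]
    have hds : PySem.Int.toStr (m % 8) = String.ofList [Nat.digitChar (m % 8).toNat] :=
      toStr_digit _ h2 (by omega)
    have hmod : (m % 8).toNat = m.toNat % 8 := by omega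
    have hdivtn : (m / 8).toNat = m.toNat / 8 := by omega
    by_cases hq : 0 < m / 8
    · rw [ih (m / 8) (by omega) hq]
      have h8 : 8 ≤ m.toNat := by omega
      rw [Nat.toDigits_of_base_le (by norm_num) h8, String.ofList_append, hds, hmod, hdivtn,
          String.append_assoc]
    · rw [octLoop, if_neg hq, hds, hmod]
      have hlt : m.toNat < 8 := by omega
      rw [Nat.toDigits_of_lt_base hlt, Nat.mod_eq_of_lt hlt]

-- the two tails agree for every nonnegative parsed value m
theorem tail_eq (m : Int) (hm : 0 ≤ m) :
    (List.drop 1 (List.drop 1 ((pyOct m).toList.map (fun c => String.singleton c)))).foldl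
        (fun acc i => acc ++ i) ""
      = if m = 0 then "0" else octLoop m "" := by
  unfold pyOct
  rw [if_neg (by omega), String.toList_ofList]
  simp only [List.map_cons, List.drop_succ_cons, List.drop_zero]
  rw [foldl_append_singletons, String.empty_append]
  by_cases h0 : m = 0
  · subst h0
    rw [if_pos rfl]
    decide
  · rw [if_neg h0, octLoop_eq_aux m.toNat m le_rfl (by omega), String.append_empty]

-- a parsed all-digit string is never negative (int() can go negative only through a '-' sign)
theorem ofChars?_nonneg (s : List Char) (hd : ∀ c ∈ s, c.isDigit)
    (m : Int) (h : PySem.Int.ofChars? s = some m) : 0 ≤ m := by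
  unfold PySem.Int.ofChars? at h
  have hsub : ∀ c ∈ (((s.dropWhile PySem.Int.isIntSpace).reverse.dropWhile
      PySem.Int.isIntSpace).reverse), c.isDigit := by
    intro c hc
    have h1 := (List.dropWhile_sublist (l := (s.dropWhile PySem.Int.isIntSpace).reverse)
      PySem.Int.isIntSpace).subset
    have h2 := (List.dropWhile_sublist (l := s) PySem.Int.isIntSpace).subset
    exact hd c (h2 (List.mem_reverse.mp (h1 (List.mem_reverse.mp hc))))
  generalize hcs : (((s.dropWhile PySem.Int.isIntSpace).reverse.dropWhile
      PySem.Int.isIntSpace).reverse) = cs at hsub h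
  dsimp only at h
  split at h
  · have hdig := hsub '-' (by simp)
    simp [Char.isDigit] at hdig
  · simp only [Option.map_eq_some_iff] at h
    obtain ⟨a, ha, rfl⟩ := h
    simp only [Option.pure_def, Option.bind_eq_bind, Option.bind_eq_some_iff,
      Option.some.injEq] at ha
    obtain ⟨b, hb, rfl⟩ := ha
    positivity
  · simp only [Option.map_eq_some_iff] at h
    obtain ⟨a, ha, rfl⟩ := h
    simp only [Option.pure_def, Option.bind_eq_bind, Option.bind_eq_some_iff,
      Option.some.injEq] at ha
    obtain ⟨b, hb, rfl⟩ := ha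
    positivity

-- ===== VERDICT (by name: the statement is the Claim_ definition above) =====
theorem ten_to_eight_spec : Claim_equal_ten_to_eight := by
  intro n _ hpre
  unfold Pre_ten_to_eight at hpre
  unfold Spec_ten_to_eight ten_to_eight ten_to_eight_alt
  rw [PySem.Str.slice?_none_none_neg_one]
  have hrev : (PySem.Int.toStr n).toList.reverse = (Nat.toDigits 10 n.toNat).reverse := by
    rw [PySem.Int.toList_toStr]
    unfold PySem.Int.toChars
    rw [if_neg (by omega)]
  rw [hrev]
  simp only [PySem.Int.ofStr?_ofList]
  cases hp : PySem.Int.ofChars? ((Nat.toDigits 10 n.toNat).reverse) with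
  | none => rfl
  | some m =>
    have hm : 0 ≤ m := by
      refine ofChars?_nonneg _ ?_ m hp
      intro c hc
      exact Nat.isDigit_of_mem_toDigits (by norm_num) (by norm_num) (List.mem_reverse.mp hc)
    simpa using tail_eq m hm
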